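-- pv_equiv track=rewrite | github.com/tthuy123/crypt | backend/app/services/math_utils.py | U_V_subscript
-- ===== SOURCE A (Python) =====
-- div2mod = lambda x,n: ((x+n)>>1)%n if x&1 else (x>>1)%n
--
-- def U_V_subscript(k, n, P, D):
--   U=1
--   V=P
--   digits = bin(k)[2:]
--
--   for digit in digits[1:]:
--     U, V = (U*V) % n,  div2mod(V*V + D*U*U, n)
--
--     if digit == '1':
--       U,V = div2mod(P*U + V, n), div2mod(D*U + P*V, n)
--   return U, V
-- ===== SOURCE B (Python) =====
-- def U_V_subscript(k, n, P, D):
--     def half(x):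
--         if x % 2:
--             x += n
--         return (x // 2) % n
--
--     def go(m):
--         if m <= 1:
--             return 1, P
--         U, V = go(m >> 1)
--         U, V = U * V % n, half(V * V + D * U * U)
--         if m % 2:
--             U, V = half(P * U + V), half(D * U + P * V)
--         return U, V
--
--     return go(k)
-- ===== Notes on version B (the rewrite author's own statement) =====
-- stated objective: alternative
-- what changed: B replaces A's bin()-string construction and MSB-first loop over the digit characters by a direct recursion on k (recurse on k>>1, then apply the doubling step and, for odd k, the addition step), eliminating the int-to-string round-trip while performing the identical arithmetic sequence.
-- outside the precondition, e.g. on U_V_subscript(-3, 7, 1, 5): A returns (6, 1), B returns (1, 1)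
import Mathlib
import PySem

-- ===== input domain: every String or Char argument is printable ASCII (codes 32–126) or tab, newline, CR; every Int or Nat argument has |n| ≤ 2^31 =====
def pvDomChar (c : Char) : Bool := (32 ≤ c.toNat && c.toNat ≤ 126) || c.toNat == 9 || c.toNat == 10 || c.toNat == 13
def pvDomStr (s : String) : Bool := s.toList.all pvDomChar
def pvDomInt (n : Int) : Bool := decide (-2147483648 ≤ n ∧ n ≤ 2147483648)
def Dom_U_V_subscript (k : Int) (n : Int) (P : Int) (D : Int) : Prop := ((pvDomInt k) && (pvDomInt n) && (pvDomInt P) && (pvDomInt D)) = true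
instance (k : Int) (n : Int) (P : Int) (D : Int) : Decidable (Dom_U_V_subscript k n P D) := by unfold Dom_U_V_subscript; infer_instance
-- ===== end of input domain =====

-- B replaces A's bin()-string MSB-first digit loop by direct recursion on k (same arithmetic, no string round-trip); equal on 0 ≤ k with n ≠ 0 (or k ≤ 1).

-- ===== PORT A =====

-- div2mod = lambda x,n: ((x+n)>>1)%n if x&1 else (x>>1)%n   ('>>1' is Python floor shift = floordiv by 2, exact)
def div2mod (x : Int) (n : Int) : Int :=
  if PySem.Int.band x 1 ≠ 0 then PySem.Int.mod (PySem.Int.floordiv (x + n) 2) n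
  else PySem.Int.mod (PySem.Int.floordiv x 2) n

-- bin(m) for m : Nat, as its list of characters (hand port of Python's bin, exact for m ≥ 0: msb-first, bin(0)="0")
def natBin (m : Nat) : List Char :=
  if m < 2 then [if m = 1 then '1' else '0']
  else natBin (m / 2) ++ [if m % 2 = 1 then '1' else '0']
  decreasing_by exact Nat.div_lt_self (by omega) (by omega)

-- one iteration of A's for-loop body
def aStep (n P D : Int) (s : Int × Int) (digit : Char) : Int × Int :=
  let U := PySem.Int.mod (s.1 * s.2) n
  let V := div2mod (s.2 * s.2 + D * s.1 * s.1) n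
  if digit = '1' then (div2mod (P * U + V) n, div2mod (D * U + P * V) n) else (U, V)

-- bin(k)[2:]: for k ≥ 0 the binary digits; for k < 0, '-0b…'[2:] is 'b' ++ digits of |k|, so digits[1:] is all digits of |k|
def U_V_subscript (k : Int) (n : Int) (P : Int) (D : Int) : Int × Int :=
  let tail := if k < 0 then natBin (-k).toNat else (natBin k.toNat).drop 1
  tail.foldl (aStep n P D) (1, P)

-- ===== PORT B =====

-- def half(x): if x % 2: x += n ; return (x // 2) % n
def halfMod (n : Int) (x : Int) : Int :=
  if PySem.Int.mod x 2 ≠ 0 then PySem.Int.mod (PySem.Int.floordiv (x + n) 2) n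
  else PySem.Int.mod (PySem.Int.floordiv x 2) n

-- def go(m): if m <= 1: return 1, P ; U,V = go(m >> 1) ; U,V = U*V%n, half(V*V+D*U*U) ; if m % 2: …
def goB (n P D : Int) (m : Nat) : Int × Int :=
  if m ≤ 1 then (1, P)
  else
    let s := goB n P D (m / 2)
    let U := PySem.Int.mod (s.1 * s.2) n
    let V := halfMod n (s.2 * s.2 + D * s.1 * s.1)
    if m % 2 = 1 then (halfMod n (P * U + V), halfMod n (D * U + P * V)) else (U, V)
  decreasing_by exact Nat.div_lt_self (by omega) (by omega)

def U_V_subscript_alt (k : Int) (n : Int) (P : Int) (D : Int) : Int × Int :=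
  goB n P D k.toNat

-- ===== PRECONDITION & SPEC =====
-- Pre_ excludes (a) k < 0, where A iterates over the garbage slice bin(k)[2:][1:] (an artefact of string slicing on the
-- '-0b…' form; B naturally returns the subscript-1 state (1, P) there), and (b) n = 0 with k ≥ 2, where A raises
-- ZeroDivisionError (B raises there too).
def Pre_U_V_subscript (k : Int) (n : Int) (P : Int) (D : Int) : Prop := 0 ≤ k ∧ (n ≠ 0 ∨ k ≤ 1)
instance (k : Int) (n : Int) (P : Int) (D : Int) : Decidable (Pre_U_V_subscript k n P D) := by unfold Pre_U_V_subscript; infer_instance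
def pvWitness_U_V_subscript : Int × Int × Int × Int := (5, 7, 3, 2)

def Spec_U_V_subscript (k : Int) (n : Int) (P : Int) (D : Int) (out : Int × Int) : Prop := out = U_V_subscript_alt k n P D
instance (k : Int) (n : Int) (P : Int) (D : Int) (out : Int × Int) : Decidable (Spec_U_V_subscript k n P D out) := by unfold Spec_U_V_subscript; infer_instance

-- ===== CLAIM (what is proved, stated in full; the proofs are below) =====
def Claim_equal_U_V_subscript : Prop := ∀ (k : Int) (n : Int) (P : Int) (D : Int), Dom_U_V_subscript k n P D → Pre_U_V_subscript k n P D → Spec_U_V_subscript k n P D (U_V_subscript k n P D)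

-- ===== LEMMAS AND PROOFS =====

-- A's div2mod and B's half compute the same value (x&1 = x % 2)
theorem div2mod_eq_halfMod (x n : Int) : div2mod x n = halfMod n x := by
  unfold div2mod halfMod
  rw [PySem.Int.band_one]

theorem natBin_ne_nil (m : Nat) : natBin m ≠ [] := by
  rw [natBin]
  split <;> simp

-- the core correspondence: folding A's loop over the dropped-msb digit list equals B's recursion
theorem fold_eq_go (n P D : Int) : ∀ m : Nat,
    ((natBin m).drop 1).foldl (aStep n P D) (1, P) = goB n P D m := by
  intro m
  induction m using Nat.strong_induction_on with
  | _ m ih =>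
    by_cases hm : m ≤ 1
    · rw [natBin, goB]
      simp [hm, show m < 2 by omega]
    · have hrec : m / 2 < m := Nat.div_lt_self (by omega) (by omega)
      have hne : natBin (m / 2) ≠ [] := natBin_ne_nil _
      rw [natBin, goB]
      simp only [show ¬ m < 2 by omega, hm, if_false]
      rw [List.drop_one, List.tail_append_of_ne_nil hne, ← List.drop_one,
          List.foldl_append, ih (m / 2) hrec]
      unfold aStep
      simp only [List.foldl_cons, List.foldl_nil, div2mod_eq_halfMod]
      by_cases hpar : m % 2 = 1 <;> simp [hpar]

-- ===== VERDICT (by name: the statement is the Claim_ definition above) =====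
theorem U_V_subscript_spec : Claim_equal_U_V_subscript := by
  intro k n P D _ hpre
  obtain ⟨hk0, -⟩ := hpre
  unfold Spec_U_V_subscript U_V_subscript U_V_subscript_alt
  have hk : ¬ k < 0 := by omega
  simp only [hk, if_false]
  exact fold_eq_go n P D k.toNat
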